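-- pv_equiv track=rewrite | github.com/pabrodbra/RACKit | src/python/deprecated/matrixSeqCompare.py | RAC_coverage_comparison
-- ===== SOURCE A (Python) =====
-- def RAC_coverage_comparison(s_len, read_seq, contig_seq, max_hits):
-- 	read_only = 0
-- 	contig_only = 0
-- 	both_yes = 0
-- 	both_no = 0
--
-- 	read_hits = 0
-- 	contig_hits = 0
--
-- 	read_mat = list()
-- 	contig_mat = list()
--
-- 	for i in range(0, s_len-1, 1):
-- 		if read_seq[i]==contig_seq[i]:
-- 			if read_seq[i] == '1':
-- 				both_yes+=1
-- 			else:
-- 				both_no+=1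
-- 		else:
-- 			if read_seq[i] == '1':
-- 				read_only+=1
-- 				read_hits+=1
-- 			else:
-- 				contig_only+=1
-- 				contig_hits+=1
--
-- 		if (i+1) % max_hits == 0:
-- 			read_mat.append(read_hits)
-- 			contig_mat.append(contig_hits)
-- 			read_hits = contig_hits = 0
--
--
-- 	return read_only, contig_only, both_yes, both_no, read_mat, contig_mat
-- ===== SOURCE B (Python) =====
-- def RAC_coverage_comparison(s_len, read_seq, contig_seq, max_hits):
--     n = s_len - 1
--     if n <= 0:
--         return 0, 0, 0, 0, [], []
--     pairs = list(zip(read_seq[:n], contig_seq[:n]))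
--     both_yes = sum(1 for r, c in pairs if r == c and r == '1')
--     both_no = sum(1 for r, c in pairs if r == c and r != '1')
--     read_only = sum(1 for r, c in pairs if r != c and r == '1')
--     contig_only = sum(1 for r, c in pairs if r != c and r != '1')
--     read_mat = []
--     contig_mat = []
--     for k in range(n // max_hits):
--         block = pairs[k * max_hits:(k + 1) * max_hits]
--         read_mat.append(sum(1 for r, c in block if r != c and r == '1'))
--         contig_mat.append(sum(1 for r, c in block if r != c and r != '1'))
--     return read_only, contig_only, both_yes, both_no, read_mat, contig_mat
-- ===== Notes on version B (the rewrite author's own statement) =====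
-- stated objective: alternative
-- what changed: Replaces A's single stateful loop (running bin accumulators reset at each boundary) with four independent counting passes over the zipped prefix plus a block-wise pass slicing each complete bin window; Pre_ excludes inputs where A raises (IndexError/ZeroDivisionError) and negative max_hits, where A's binning by |max_hits| is an accident of Python's modulo sign rule for negative divisors.
-- outside the precondition, e.g. on RAC_coverage_comparison(4, '101', '110', -2): A returns (1, 1, 1, 0, [0], [1]), B returns (1, 1, 1, 0, [], [])
import Mathlib
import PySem

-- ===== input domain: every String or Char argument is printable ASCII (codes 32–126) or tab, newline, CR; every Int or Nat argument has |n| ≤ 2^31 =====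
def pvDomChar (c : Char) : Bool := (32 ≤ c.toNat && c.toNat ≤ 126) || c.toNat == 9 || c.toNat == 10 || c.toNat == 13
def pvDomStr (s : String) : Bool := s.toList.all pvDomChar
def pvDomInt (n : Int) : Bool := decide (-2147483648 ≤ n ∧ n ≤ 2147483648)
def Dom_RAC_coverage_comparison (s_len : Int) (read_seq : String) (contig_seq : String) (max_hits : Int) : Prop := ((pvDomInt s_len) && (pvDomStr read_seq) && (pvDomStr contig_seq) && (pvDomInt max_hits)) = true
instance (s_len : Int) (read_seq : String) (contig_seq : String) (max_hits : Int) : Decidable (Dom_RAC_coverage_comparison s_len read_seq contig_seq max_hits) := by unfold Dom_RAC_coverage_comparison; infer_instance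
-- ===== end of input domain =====

-- B replaces A's single stateful loop with independent counting passes plus a block-wise
-- pass over complete bin windows (alternative decomposition, same cost).

-- ===== PORT A =====
structure RACState where
  ro : Int
  co : Int
  byes : Int
  bno : Int
  rh : Int
  ch : Int
  rmat : List Int
  cmat : List Int
deriving Repr, DecidableEq

-- one iteration of A's for-loop; out-of-range indexing (excluded by Pre_) defaults to ' '
def RACStep (read_seq contig_seq : String) (max_hits : Int) (s : RACState) (i : Int) : RACState :=
  let r := (PySem.Str.pyGet? read_seq i).getD ' '
  let c := (PySem.Str.pyGet? contig_seq i).getD ' '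
  let s :=
    if r = c then
      if r = '1' then { s with byes := s.byes + 1 } else { s with bno := s.bno + 1 }
    else
      if r = '1' then { s with ro := s.ro + 1, rh := s.rh + 1 }
      else { s with co := s.co + 1, ch := s.ch + 1 }
  if PySem.Int.mod (i + 1) max_hits = 0 then
    { s with rmat := s.rmat ++ [s.rh], cmat := s.cmat ++ [s.ch], rh := 0, ch := 0 }
  else s

def RAC_coverage_comparison (s_len : Int) (read_seq : String) (contig_seq : String) (max_hits : Int) : Int × Int × Int × Int × List Int × List Int :=
  let st := (PySem.List.pyRange 0 (s_len - 1) 1).foldl (RACStep read_seq contig_seq max_hits)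
    ⟨0, 0, 0, 0, 0, 0, [], []⟩
  (st.ro, st.co, st.byes, st.bno, st.rmat, st.cmat)

-- ===== PORT B =====
def RAC_coverage_comparison_alt (s_len : Int) (read_seq : String) (contig_seq : String) (max_hits : Int) : Int × Int × Int × Int × List Int × List Int :=
  let n := s_len - 1
  if n ≤ 0 then (0, 0, 0, 0, [], [])
  else
    let pairs := (PySem.List.slice read_seq.toList none (some n)).zip
                 (PySem.List.slice contig_seq.toList none (some n))
    let both_yes : Int := pairs.countP (fun rc => rc.1 == rc.2 && rc.1 == '1')
    let both_no : Int := pairs.countP (fun rc => rc.1 == rc.2 && rc.1 != '1')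
    let read_only : Int := pairs.countP (fun rc => rc.1 != rc.2 && rc.1 == '1')
    let contig_only : Int := pairs.countP (fun rc => rc.1 != rc.2 && rc.1 != '1')
    let read_mat := (PySem.List.pyRange 0 (PySem.Int.floordiv n max_hits) 1).map (fun k =>
      ((PySem.List.slice pairs (some (k * max_hits)) (some ((k + 1) * max_hits))).countP
        (fun rc => rc.1 != rc.2 && rc.1 == '1') : Int))
    let contig_mat := (PySem.List.pyRange 0 (PySem.Int.floordiv n max_hits) 1).map (fun k =>
      ((PySem.List.slice pairs (some (k * max_hits)) (some ((k + 1) * max_hits))).countP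
        (fun rc => rc.1 != rc.2 && rc.1 != '1') : Int))
    (read_only, contig_only, both_yes, both_no, read_mat, contig_mat)

-- ===== PRECONDITION & SPEC =====
-- Pre_ excludes the inputs where A raises (IndexError when s_len-1 exceeds a string
-- length; ZeroDivisionError when the loop runs with max_hits = 0) and negative max_hits,
-- on which A's binning by |max_hits| is an accident of Python's modulo sign rule for
-- negative divisors (B returns empty matrices there).
def Pre_RAC_coverage_comparison (s_len : Int) (read_seq : String) (contig_seq : String) (max_hits : Int) : Prop :=
  s_len ≤ 1 ∨ (0 < max_hits ∧ s_len - 1 ≤ (read_seq.toList.length : Int) ∧ s_len - 1 ≤ (contig_seq.toList.length : Int))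
instance (s_len : Int) (read_seq : String) (contig_seq : String) (max_hits : Int) : Decidable (Pre_RAC_coverage_comparison s_len read_seq contig_seq max_hits) := by unfold Pre_RAC_coverage_comparison; infer_instance

def pvWitness_RAC_coverage_comparison : Int × String × String × Int := (6, "10110", "11010", 2)

def Spec_RAC_coverage_comparison (s_len : Int) (read_seq : String) (contig_seq : String) (max_hits : Int) (out : Int × Int × Int × Int × List Int × List Int) : Prop := out = RAC_coverage_comparison_alt s_len read_seq contig_seq max_hits
instance (s_len : Int) (read_seq : String) (contig_seq : String) (max_hits : Int) (out : Int × Int × Int × Int × List Int × List Int) : Decidable (Spec_RAC_coverage_comparison s_len read_seq contig_seq max_hits out) := by unfold Spec_RAC_coverage_comparison; infer_instance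

-- ===== CLAIM (what is proved, stated in full; the proofs are below) =====
def Claim_equal_RAC_coverage_comparison : Prop := ∀ (s_len : Int) (read_seq : String) (contig_seq : String) (max_hits : Int), Dom_RAC_coverage_comparison s_len read_seq contig_seq max_hits → Pre_RAC_coverage_comparison s_len read_seq contig_seq max_hits → Spec_RAC_coverage_comparison s_len read_seq contig_seq max_hits (RAC_coverage_comparison s_len read_seq contig_seq max_hits)

-- ===== LEMMAS AND PROOFS =====

-- ===== proof-only helpers =====
def pvPair (rl cl : List Char) (i : Nat) : Char × Char := (rl.getD i ' ', cl.getD i ' ')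
def qBY (rc : Char × Char) : Bool := rc.1 == rc.2 && rc.1 == '1'
def qBN (rc : Char × Char) : Bool := rc.1 == rc.2 && rc.1 != '1'
def qRO (rc : Char × Char) : Bool := rc.1 != rc.2 && rc.1 == '1'
def qCO (rc : Char × Char) : Bool := rc.1 != rc.2 && rc.1 != '1'
def cnt (q : Char × Char → Bool) (rl cl : List Char) (l : List Nat) : Int :=
  (l.countP (fun i => q (pvPair rl cl i)) : Int)

lemma range_drop_take (a M N : Nat) (h : a + M ≤ N) :
    ((List.range N).drop a).take M = List.range' a M := by
  rw [List.range_eq_range', List.drop_range', List.take_range'_of_length_ge (by simpa using by omega)]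
  simp

lemma zip_take_eq_map_range (rl cl : List Char) (N : Nat)
    (h1 : N ≤ rl.length) (h2 : N ≤ cl.length) :
    (rl.take N).zip (cl.take N) = (List.range N).map (pvPair rl cl) := by
  apply List.ext_getElem
  · simp [h1, h2]
  · intro i hi hi'
    simp only [List.getElem_zip, List.getElem_take, List.getElem_map, List.getElem_range]
    have hl1 : i < rl.length := by simp at hi; omega
    have hl2 : i < cl.length := by simp at hi; omega
    simp [pvPair, List.getD_eq_getElem?_getD, hl1, hl2]

-- the loop invariant for A's fold, with M = max_hits.natAbs > 0
lemma foldA_inv (read_seq contig_seq : String) (max_hits : Int) (hm : max_hits ≠ 0)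
    (rl cl : List Char) (hrl : read_seq.toList = rl) (hcl : contig_seq.toList = cl)
    (M : Nat) (hMdef : M = max_hits.natAbs)
    (j : Nat) (hjr : j ≤ rl.length) (hjc : j ≤ cl.length) :
    (List.range j).foldl (fun s (k : Nat) => RACStep read_seq contig_seq max_hits s (k : Int))
      ⟨0, 0, 0, 0, 0, 0, [], []⟩ =
    { ro := cnt qRO rl cl (List.range j), co := cnt qCO rl cl (List.range j),
      byes := cnt qBY rl cl (List.range j), bno := cnt qBN rl cl (List.range j),
      rh := cnt qRO rl cl (List.range' ((j / M) * M) (j - (j / M) * M)),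
      ch := cnt qCO rl cl (List.range' ((j / M) * M) (j - (j / M) * M)),
      rmat := (List.range (j / M)).map (fun k => cnt qRO rl cl (List.range' (k * M) M)),
      cmat := (List.range (j / M)).map (fun k => cnt qCO rl cl (List.range' (k * M) M)) } := by
  have hM : 0 < M := hMdef ▸ Int.natAbs_pos.mpr hm
  induction j with
  | zero => simp [cnt, Nat.zero_div]
  | succ j ih =>
    have hjr' : j ≤ rl.length := by omega
    have hjc' : j ≤ cl.length := by omega
    conv_lhs => rw [List.range_succ]
    rw [List.foldl_append, ih hjr' hjc']
    simp only [List.foldl_cons, List.foldl_nil]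
    have hgr : (PySem.Str.pyGet? read_seq (j : Int)).getD ' ' = (pvPair rl cl j).1 := by
      simp [pvPair, List.getD_eq_getElem?_getD, hrl]
    have hgc : (PySem.Str.pyGet? contig_seq (j : Int)).getD ' ' = (pvPair rl cl j).2 := by
      simp [pvPair, List.getD_eq_getElem?_getD, hcl]
    have hmod : (PySem.Int.mod ((j : Int) + 1) max_hits = 0) ↔ (M ∣ (j + 1)) := by
      rw [PySem.Int.mod_eq_zero_iff_dvd, ← Int.natAbs_dvd, ← hMdef]
      exact_mod_cast Iff.rfl
    have hble : (j / M) * M ≤ j := Nat.div_mul_le_self j M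
    have hcnt_succ : ∀ q, cnt q rl cl (List.range (j + 1)) =
        cnt q rl cl (List.range j) + if q (pvPair rl cl j) then 1 else 0 := by
      intro q
      simp only [cnt, List.range_succ, List.countP_append, List.countP_cons, List.countP_nil]
      push_cast; split_ifs <;> simp_all
    have hrng_succ : ∀ q, cnt q rl cl (List.range' ((j / M) * M) (j - (j / M) * M + 1)) =
        cnt q rl cl (List.range' ((j / M) * M) (j - (j / M) * M)) + if q (pvPair rl cl j) then 1 else 0 := by
      intro q
      rw [List.range'_1_concat, show (j / M) * M + (j - (j / M) * M) = j from by omega]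
      simp only [cnt, List.countP_append, List.countP_cons, List.countP_nil]
      push_cast; split_ifs <;> simp_all
    unfold RACStep
    rw [hgr, hgc]
    by_cases hdvd : M ∣ (j + 1)
    case pos =>
      have hmodT : PySem.Int.mod ((j : Int) + 1) max_hits = 0 := hmod.mpr hdvd
      have hdiv : (j + 1) / M = j / M + 1 := by rw [Nat.succ_div]; simp [hdvd]
      have hfull : (j / M) * M + M = j + 1 := by
        calc (j / M) * M + M = ((j + 1) / M) * M := by rw [hdiv]; ring
        _ = j + 1 := Nat.div_mul_cancel hdvd
      have hlen : j - (j / M) * M + 1 = M := by omega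
      have hnewb : ((j + 1) / M) * M = j + 1 := by rw [hdiv, Nat.succ_mul]; omega
      have hsplit : List.range' ((j / M) * M) M = List.range' ((j / M) * M) (j - (j / M) * M) ++ [j] := by
        have h := List.range'_1_concat (s := (j / M) * M) (n := j - (j / M) * M)
        rw [hlen, show (j / M) * M + (j - (j / M) * M) = j from by omega] at h
        exact h
      have hbin : ∀ q, cnt q rl cl (List.range' ((j / M) * M) M) =
          cnt q rl cl (List.range' ((j / M) * M) (j - (j / M) * M)) + if q (pvPair rl cl j) then 1 else 0 := by
        intro q
        rw [hsplit]
        simp only [cnt, List.countP_append, List.countP_cons, List.countP_nil]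
        push_cast; split_ifs <;> simp_all
      rw [if_pos hmodT]
      by_cases h1 : (pvPair rl cl j).1 = (pvPair rl cl j).2 <;> by_cases h2 : (pvPair rl cl j).1 = '1'
      · rw [if_pos h1, if_pos h2]
        simp only [RACState.mk.injEq]
        refine ⟨?_, ?_, ?_, ?_, ?_, ?_, ?_, ?_⟩
        · rw [hcnt_succ]; simp [qBY, qBN, qRO, qCO, ← h1, h2]
        · rw [hcnt_succ]; simp [qBY, qBN, qRO, qCO, ← h1, h2]
        · rw [hcnt_succ]; simp [qBY, qBN, qRO, qCO, ← h1, h2]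
        · rw [hcnt_succ]; simp [qBY, qBN, qRO, qCO, ← h1, h2]
        · rw [hnewb]; simp [cnt]
        · rw [hnewb]; simp [cnt]
        · rw [hdiv, List.range_succ, List.map_append, List.map_cons, List.map_nil, hbin]
          simp [qBY, qBN, qRO, qCO, ← h1, h2]
        · rw [hdiv, List.range_succ, List.map_append, List.map_cons, List.map_nil, hbin]
          simp [qBY, qBN, qRO, qCO, ← h1, h2]
      · rw [if_pos h1, if_neg h2]
        simp only [RACState.mk.injEq]
        refine ⟨?_, ?_, ?_, ?_, ?_, ?_, ?_, ?_⟩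
        · rw [hcnt_succ]; simp [qBY, qBN, qRO, qCO, ← h1, h2]
        · rw [hcnt_succ]; simp [qBY, qBN, qRO, qCO, ← h1, h2]
        · rw [hcnt_succ]; simp [qBY, qBN, qRO, qCO, ← h1, h2]
        · rw [hcnt_succ]; simp [qBY, qBN, qRO, qCO, ← h1, h2]
        · rw [hnewb]; simp [cnt]
        · rw [hnewb]; simp [cnt]
        · rw [hdiv, List.range_succ, List.map_append, List.map_cons, List.map_nil, hbin]
          simp [qBY, qBN, qRO, qCO, ← h1, h2]
        · rw [hdiv, List.range_succ, List.map_append, List.map_cons, List.map_nil, hbin]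
          simp [qBY, qBN, qRO, qCO, ← h1, h2]
      · rw [if_neg h1, if_pos h2]
        simp only [RACState.mk.injEq]
        refine ⟨?_, ?_, ?_, ?_, ?_, ?_, ?_, ?_⟩
        · rw [hcnt_succ]; have h3 := h2 ▸ h1; simp [qBY, qBN, qRO, qCO, h1, h2, h3]
        · rw [hcnt_succ]; have h3 := h2 ▸ h1; simp [qBY, qBN, qRO, qCO, h1, h2, h3]
        · rw [hcnt_succ]; have h3 := h2 ▸ h1; simp [qBY, qBN, qRO, qCO, h1, h2, h3]
        · rw [hcnt_succ]; have h3 := h2 ▸ h1; simp [qBY, qBN, qRO, qCO, h1, h2, h3]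
        · rw [hnewb]; simp [cnt]
        · rw [hnewb]; simp [cnt]
        · rw [hdiv, List.range_succ, List.map_append, List.map_cons, List.map_nil, hbin]
          have h3 := h2 ▸ h1; simp [qBY, qBN, qRO, qCO, h1, h2, h3]
        · rw [hdiv, List.range_succ, List.map_append, List.map_cons, List.map_nil, hbin]
          have h3 := h2 ▸ h1; simp [qBY, qBN, qRO, qCO, h1, h2, h3]
      · rw [if_neg h1, if_neg h2]
        simp only [RACState.mk.injEq]
        refine ⟨?_, ?_, ?_, ?_, ?_, ?_, ?_, ?_⟩
        · rw [hcnt_succ]; simp [qBY, qBN, qRO, qCO, h1, h2]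
        · rw [hcnt_succ]; simp [qBY, qBN, qRO, qCO, h1, h2]
        · rw [hcnt_succ]; simp [qBY, qBN, qRO, qCO, h1, h2]
        · rw [hcnt_succ]; simp [qBY, qBN, qRO, qCO, h1, h2]
        · rw [hnewb]; simp [cnt]
        · rw [hnewb]; simp [cnt]
        · rw [hdiv, List.range_succ, List.map_append, List.map_cons, List.map_nil, hbin]
          simp [qBY, qBN, qRO, qCO, h1, h2]
        · rw [hdiv, List.range_succ, List.map_append, List.map_cons, List.map_nil, hbin]
          simp [qBY, qBN, qRO, qCO, h1, h2]
    case neg =>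
      have hmodF : ¬ PySem.Int.mod ((j : Int) + 1) max_hits = 0 := fun h => hdvd (hmod.mp h)
      have hdiv : (j + 1) / M = j / M := by rw [Nat.succ_div]; simp [hdvd]
      have hsh : j + 1 - (j / M) * M = (j - (j / M) * M) + 1 := by omega
      rw [if_neg hmodF]
      by_cases h1 : (pvPair rl cl j).1 = (pvPair rl cl j).2 <;> by_cases h2 : (pvPair rl cl j).1 = '1'
      · rw [if_pos h1, if_pos h2]
        simp only [RACState.mk.injEq]
        refine ⟨?_, ?_, ?_, ?_, ?_, ?_, ?_, ?_⟩
        · rw [hcnt_succ]; simp [qBY, qBN, qRO, qCO, ← h1, h2]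
        · rw [hcnt_succ]; simp [qBY, qBN, qRO, qCO, ← h1, h2]
        · rw [hcnt_succ]; simp [qBY, qBN, qRO, qCO, ← h1, h2]
        · rw [hcnt_succ]; simp [qBY, qBN, qRO, qCO, ← h1, h2]
        · rw [hdiv, hsh, hrng_succ]; simp [qBY, qBN, qRO, qCO, ← h1, h2]
        · rw [hdiv, hsh, hrng_succ]; simp [qBY, qBN, qRO, qCO, ← h1, h2]
        · rw [hdiv]
        · rw [hdiv]
      · rw [if_pos h1, if_neg h2]
        simp only [RACState.mk.injEq]
        refine ⟨?_, ?_, ?_, ?_, ?_, ?_, ?_, ?_⟩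
        · rw [hcnt_succ]; simp [qBY, qBN, qRO, qCO, ← h1, h2]
        · rw [hcnt_succ]; simp [qBY, qBN, qRO, qCO, ← h1, h2]
        · rw [hcnt_succ]; simp [qBY, qBN, qRO, qCO, ← h1, h2]
        · rw [hcnt_succ]; simp [qBY, qBN, qRO, qCO, ← h1, h2]
        · rw [hdiv, hsh, hrng_succ]; simp [qBY, qBN, qRO, qCO, ← h1, h2]
        · rw [hdiv, hsh, hrng_succ]; simp [qBY, qBN, qRO, qCO, ← h1, h2]
        · rw [hdiv]
        · rw [hdiv]
      · rw [if_neg h1, if_pos h2]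
        simp only [RACState.mk.injEq]
        refine ⟨?_, ?_, ?_, ?_, ?_, ?_, ?_, ?_⟩
        · rw [hcnt_succ]; have h3 := h2 ▸ h1; simp [qBY, qBN, qRO, qCO, h1, h2, h3]
        · rw [hcnt_succ]; have h3 := h2 ▸ h1; simp [qBY, qBN, qRO, qCO, h1, h2, h3]
        · rw [hcnt_succ]; have h3 := h2 ▸ h1; simp [qBY, qBN, qRO, qCO, h1, h2, h3]
        · rw [hcnt_succ]; have h3 := h2 ▸ h1; simp [qBY, qBN, qRO, qCO, h1, h2, h3]
        · rw [hdiv, hsh, hrng_succ]; have h3 := h2 ▸ h1; simp [qBY, qBN, qRO, qCO, h1, h2, h3]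
        · rw [hdiv, hsh, hrng_succ]; have h3 := h2 ▸ h1; simp [qBY, qBN, qRO, qCO, h1, h2, h3]
        · rw [hdiv]
        · rw [hdiv]
      · rw [if_neg h1, if_neg h2]
        simp only [RACState.mk.injEq]
        refine ⟨?_, ?_, ?_, ?_, ?_, ?_, ?_, ?_⟩
        · rw [hcnt_succ]; simp [qBY, qBN, qRO, qCO, h1, h2]
        · rw [hcnt_succ]; simp [qBY, qBN, qRO, qCO, h1, h2]
        · rw [hcnt_succ]; simp [qBY, qBN, qRO, qCO, h1, h2]
        · rw [hcnt_succ]; simp [qBY, qBN, qRO, qCO, h1, h2]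
        · rw [hdiv, hsh, hrng_succ]; simp [qBY, qBN, qRO, qCO, h1, h2]
        · rw [hdiv, hsh, hrng_succ]; simp [qBY, qBN, qRO, qCO, h1, h2]
        · rw [hdiv]
        · rw [hdiv]

lemma bin_bound (k M N : Nat) (hk : k < N / M) : k * M + M ≤ N :=
  calc k * M + M = (k + 1) * M := (Nat.succ_mul k M).symm
  _ ≤ (N / M) * M := Nat.mul_le_mul_right M hk
  _ ≤ N := Nat.div_mul_le_self N M

-- ===== VERDICT (by name: the statement is the Claim_ definition above) =====
theorem RAC_coverage_comparison_spec : Claim_equal_RAC_coverage_comparison := by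
  intro s_len read_seq contig_seq max_hits hdom hpre
  unfold Spec_RAC_coverage_comparison RAC_coverage_comparison RAC_coverage_comparison_alt
  by_cases hn : s_len - 1 ≤ 0
  · rw [PySem.List.pyRange_one_eq_nil (by omega)]
    simp [hn]
  · have hnpos : 0 < s_len - 1 := by omega
    have hpre' : 0 < max_hits ∧ s_len - 1 ≤ (read_seq.toList.length : Int) ∧ s_len - 1 ≤ (contig_seq.toList.length : Int) := by
      rcases hpre with h | h
      · omega
      · exact h
    obtain ⟨hm, hlr, hlc⟩ := hpre'
    set rl := read_seq.toList with hrl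
    set cl := contig_seq.toList with hcl
    set N := (s_len - 1).toNat with hNdef
    set M := max_hits.natAbs with hMdef
    have hsl : s_len - 1 = (N : Int) := (Int.toNat_of_nonneg (by omega)).symm
    have hNr : N ≤ rl.length := by omega
    have hNc : N ≤ cl.length := by omega
    have hMcast : max_hits = (M : Int) := by
      rw [hMdef, Int.natCast_natAbs, abs_of_pos hm]
    rw [hsl, if_neg (by push_cast; omega)]
    -- A side
    rw [PySem.List.pyRange_one]
    simp only [sub_zero, Int.toNat_natCast, zero_add, List.foldl_map]
    rw [foldA_inv read_seq contig_seq max_hits (by omega) rl cl rfl rfl M rfl N hNr hNc]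
    -- B side
    rw [PySem.List.slice_to_natCast, PySem.List.slice_to_natCast]
    rw [zip_take_eq_map_range rl cl N hNr hNc]
    rw [hMcast, PySem.Int.floordiv_natCast, PySem.List.pyRange_zero_natCast]
    simp only [List.map_map]
    have hmat : ∀ (q : Char × Char → Bool),
        (List.range (N / M)).map ((fun (k : Int) =>
            ((PySem.List.slice ((List.range N).map (pvPair rl cl)) (some (k * (M : Int))) (some ((k + 1) * (M : Int)))).countP q : Int)) ∘ (fun (n : Nat) => (n : Int))) =
        (List.range (N / M)).map (fun k => cnt q rl cl (List.range' (k * M) M)) := by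
      intro q
      apply List.map_congr_left
      intro k hk
      have hk' : k < N / M := List.mem_range.mp hk
      simp only [Function.comp_apply]
      have e1 : ((k : Int) * (M : Int)) = ((k * M : Nat) : Int) := by push_cast; ring
      have e2 : (((k : Int) + 1) * (M : Int)) = ((k * M : Nat) : Int) + ((M : Nat) : Int) := by push_cast; ring
      rw [e1, e2, PySem.List.slice_natCast_add, ← List.map_drop, ← List.map_take]
      rw [range_drop_take (k * M) M N (bin_bound k M N hk')]
      simp [cnt, List.countP_map, Function.comp_def]
    simp only [Prod.mk.injEq]
    refine ⟨?_, ?_, ?_, ?_, ?_, ?_⟩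
    · simp [cnt, qRO, List.countP_map, Function.comp_def]
    · simp [cnt, qCO, List.countP_map, Function.comp_def]
    · simp [cnt, qBY, List.countP_map, Function.comp_def]
    · simp [cnt, qBN, List.countP_map, Function.comp_def]
    · exact (hmat _).symm
    · exact (hmat _).symm
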